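-- pv_equiv track=rewrite | github.com/Nadziratel228/ege_informatica | statgrad_dec_2022/stat_dec_22/n_25_stat.py | answer
-- ===== SOURCE A (Python) =====
-- def answer(a):
--     s = 0
--     for i in range(len(a)):
--         for j in range(i,len(a)):
--             for k in range(4):
--                 if i + j >= 8 and i == j and (k == 0 or k == 2):
--                     s += (a[i][k]*(a[i][k]-1))//2
--                 elif i + j >=8 and i == j and k == 3:
--                     break
--                 elif i + j >=8:
--                     s += a[i][k]*a[j][(4-k)%4]
--     return s
-- ===== SOURCE B (Python) =====
-- def answer(a):
--     n = len(a)
--     # Prefix sums of the four columns over rows 5..n-1: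
--     # pre[j] = (sums of a[q][0..3] for q in range(5, j)); after the loop
--     # t0..t3 hold the sums over all q in range(5, n).
--     pre = {}
--     t0 = t1 = t2 = t3 = 0
--     for j in range(5, n):
--         pre[j] = (t0, t1, t2, t3)
--         r = a[j]
--         t0 += r[0]
--         t1 += r[1]
--         t2 += r[2]
--         t3 += r[3]
--     total = 0
--     for i in range(max(0, 9 - n), n):
--         lo = max(i + 1, 8 - i)
--         if lo < n:
--             p0, p1, p2, p3 = pre[lo]
--             r = a[i]
--             total += r[0] * (t0 - p0) + r[1] * (t3 - p3) \
--                    + r[2] * (t2 - p2) + r[3] * (t1 - p1)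
--         if i >= 4:
--             r = a[i]
--             total += r[0] * (r[0] - 1) // 2 + r[2] * (r[2] - 1) // 2 + r[1] * r[3]
--     return total
-- ===== Notes on version B (the rewrite author's own statement) =====
-- stated objective: faster
-- what changed: Replaces the O(n^2) double loop over index pairs (i, j) with one prefix-sum pass over the four columns and a second pass that resolves each index's valid j-range [max(i+1, 8-i), n) in O(1) via the precomputed sums, with the diagonal i==j terms handled directly per index.
import Mathlib
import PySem

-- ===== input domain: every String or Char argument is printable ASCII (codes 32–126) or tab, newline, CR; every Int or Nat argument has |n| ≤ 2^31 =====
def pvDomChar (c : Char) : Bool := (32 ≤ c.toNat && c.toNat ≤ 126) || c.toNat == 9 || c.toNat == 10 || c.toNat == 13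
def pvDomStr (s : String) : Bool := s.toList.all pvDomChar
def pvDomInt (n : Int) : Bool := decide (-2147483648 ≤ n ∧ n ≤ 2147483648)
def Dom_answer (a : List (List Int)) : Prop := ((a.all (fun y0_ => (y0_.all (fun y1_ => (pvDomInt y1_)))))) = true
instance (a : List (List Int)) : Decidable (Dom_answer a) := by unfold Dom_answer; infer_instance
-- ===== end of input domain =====

-- B replaces A's O(n^2) double loop over index pairs by one prefix-sum pass over the
-- four columns plus one O(1)-per-index pass (objective: faster, asymptotic).

-- ===== PORT A =====
-- a[x][k] for in-range nonnegative indices (A only evaluates it there under Pre_)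
def colGet (a : List (List Int)) (x k : Int) : Int :=
  PySem.List.pyGetD (PySem.List.pyGetD a x []) k 0

-- the 'for k in range(4)' loop with its break, step for step
def kLoop (a : List (List Int)) (i j : Int) : List Int → Int → Int
  | [], s => s
  | k :: ks, s =>
    if 8 ≤ i + j ∧ i = j ∧ (k = 0 ∨ k = 2) then
      kLoop a i j ks (s + PySem.Int.floordiv (colGet a i k * (colGet a i k - 1)) 2)
    else if 8 ≤ i + j ∧ i = j ∧ k = 3 then s
    else if 8 ≤ i + j then
      kLoop a i j ks (s + colGet a i k * colGet a j (PySem.Int.mod (4 - k) 4))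
    else kLoop a i j ks s

def answer (a : List (List Int)) : Int :=
  let n : Int := a.length
  (PySem.List.pyRange 0 n 1).foldl (fun s i =>
    (PySem.List.pyRange i n 1).foldl (fun s j =>
      kLoop a i j (PySem.List.pyRange 0 4 1) s) s) 0

-- ===== PORT B =====
-- state of Source B's first loop: (pre, t0, t1, t2, t3)
def bStep (a : List (List Int))
    (st : PySem.Dict Int (Int × Int × Int × Int) × Int × Int × Int × Int) (j : Int) :
    PySem.Dict Int (Int × Int × Int × Int) × Int × Int × Int × Int :=
  let (pre, t0, t1, t2, t3) := st
  let pre := pre.insert j (t0, t1, t2, t3)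
  let r := PySem.List.pyGetD a j []
  (pre, t0 + PySem.List.pyGetD r 0 0, t1 + PySem.List.pyGetD r 1 0,
        t2 + PySem.List.pyGetD r 2 0, t3 + PySem.List.pyGetD r 3 0)

-- body of Source B's second loop
def bBody (a : List (List Int)) (n : Int)
    (pre : PySem.Dict Int (Int × Int × Int × Int)) (t0 t1 t2 t3 : Int)
    (total : Int) (i : Int) : Int :=
  let lo := max (i + 1) (8 - i)
  let total :=
    if lo < n then
      let (p0, p1, p2, p3) := pre.getD lo (0, 0, 0, 0)
      let r := PySem.List.pyGetD a i []
      total + PySem.List.pyGetD r 0 0 * (t0 - p0) + PySem.List.pyGetD r 1 0 * (t3 - p3)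
            + PySem.List.pyGetD r 2 0 * (t2 - p2) + PySem.List.pyGetD r 3 0 * (t1 - p1)
    else total
  if 4 ≤ i then
    let r := PySem.List.pyGetD a i []
    total + PySem.Int.floordiv (PySem.List.pyGetD r 0 0 * (PySem.List.pyGetD r 0 0 - 1)) 2
          + PySem.Int.floordiv (PySem.List.pyGetD r 2 0 * (PySem.List.pyGetD r 2 0 - 1)) 2
          + PySem.List.pyGetD r 1 0 * PySem.List.pyGetD r 3 0
  else total

def answer_alt (a : List (List Int)) : Int :=
  let n : Int := a.length
  let st := (PySem.List.pyRange 5 n 1).foldl (bStep a) (PySem.Dict.empty, 0, 0, 0, 0)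
  let (pre, t0, t1, t2, t3) := st
  (PySem.List.pyRange (max 0 (9 - n)) n 1).foldl (bBody a n pre t0 t1 t2 t3) 0

-- ===== PRECONDITION & SPEC =====
-- Pre_ excludes exactly the inputs on which A raises IndexError: a row that some pair
-- (i, j) with i + j >= 8 indexes (i.e. index i with i + len(a) >= 9) but has fewer than
-- 4 entries.  On every other input A returns normally.
def Pre_answer (a : List (List Int)) : Prop :=
  ∀ i ∈ List.range a.length, 9 ≤ i + a.length → 4 ≤ (a.getD i []).length
instance (a : List (List Int)) : Decidable (Pre_answer a) := by unfold Pre_answer; infer_instance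

def pvWitness_answer : List (List Int) :=
  [[1, 2], [0, 1, 2, 3], [4, 5, 6, 7], [1, 0, 1, 0], [2, 2, 2, 2],
   [1, 2, 3, 4], [5, -1, 0, 2], [7, 7, 7, 7, 7]]

def Spec_answer (a : List (List Int)) (out : Int) : Prop := out = answer_alt a
instance (a : List (List Int)) (out : Int) : Decidable (Spec_answer a out) := by unfold Spec_answer; infer_instance

-- ===== CLAIM (what is proved, stated in full; the proofs are below) =====
def Claim_equal_answer : Prop := ∀ (a : List (List Int)), Dom_answer a → Pre_answer a → Spec_answer a (answer a)

-- ===== LEMMAS AND PROOFS =====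

-- sum of f over the integer interval [lo, hi)
def S (f : Int → Int) (lo hi : Int) : Int := ((PySem.List.pyRange lo hi 1).map f).sum

-- the two per-index quantities both programs sum
def diagT (a : List (List Int)) (i : Int) : Int :=
  PySem.Int.floordiv (colGet a i 0 * (colGet a i 0 - 1)) 2
    + colGet a i 1 * colGet a i 3
    + PySem.Int.floordiv (colGet a i 2 * (colGet a i 2 - 1)) 2

def crossT (a : List (List Int)) (i j : Int) : Int :=
  colGet a i 0 * colGet a j 0 + colGet a i 1 * colGet a j 3
    + colGet a i 2 * colGet a j 2 + colGet a i 3 * colGet a j 1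

def gA (a : List (List Int)) (i j : Int) : Int :=
  if 8 ≤ i + j then (if i = j then diagT a i else crossT a i j) else 0

lemma kLoop_eq (a : List (List Int)) (i j s : Int) :
    kLoop a i j (PySem.List.pyRange 0 4 1) s = s + gA a i j := by
  have hr : PySem.List.pyRange 0 4 1 = [0, 1, 2, 3] := by decide
  rw [hr]
  by_cases h8 : 8 ≤ i + j
  · by_cases hij : i = j
    · subst hij
      simp only [kLoop, gA, diagT]
      norm_num [h8]
      ring
    · simp only [kLoop, gA, crossT]
      norm_num [h8, hij]
      ring
  · simp [kLoop, gA, h8]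

lemma S_split (f : Int → Int) {lo mid hi : Int} (h1 : lo ≤ mid) (h2 : mid ≤ hi) :
    S f lo hi = S f lo mid + S f mid hi := by
  unfold S
  rw [PySem.List.pyRange_one_append lo mid hi h1 h2, List.map_append, List.sum_append]

lemma S_zero (f : Int → Int) {lo hi : Int} (h : ∀ x, lo ≤ x → x < hi → f x = 0) :
    S f lo hi = 0 := by
  unfold S
  apply List.sum_eq_zero
  intro x hx
  obtain ⟨y, hy, rfl⟩ := List.mem_map.1 hx
  exact h y (PySem.List.mem_pyRange_one.1 hy).1 (PySem.List.mem_pyRange_one.1 hy).2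

lemma S_nil (f : Int → Int) {lo hi : Int} (h : hi ≤ lo) : S f lo hi = 0 := by
  unfold S; rw [PySem.List.pyRange_one_eq_nil h]; rfl

lemma S_congr (f g : Int → Int) {lo hi : Int} (h : ∀ x, lo ≤ x → x < hi → f x = g x) :
    S f lo hi = S g lo hi := by
  unfold S
  congr 1
  apply List.map_congr_left
  intro x hx
  exact h x (PySem.List.mem_pyRange_one.1 hx).1 (PySem.List.mem_pyRange_one.1 hx).2

lemma S_single (f : Int → Int) (i : Int) : S f i (i + 1) = f i := by
  unfold S; rw [PySem.List.pyRange_one_singleton]; simp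

lemma S_crossT (a : List (List Int)) (i lo hi : Int) :
    S (crossT a i) lo hi
      = colGet a i 0 * S (fun q => colGet a q 0) lo hi
        + colGet a i 1 * S (fun q => colGet a q 3) lo hi
        + colGet a i 2 * S (fun q => colGet a q 2) lo hi
        + colGet a i 3 * S (fun q => colGet a q 1) lo hi := by
  unfold S
  induction PySem.List.pyRange lo hi 1 with
  | nil => simp
  | cons x xs ih => simp only [List.map_cons, List.sum_cons, ih, crossT]; ring

-- A as a double sum of gA
lemma answer_eq_sum (a : List (List Int)) :
    answer a = S (fun i => S (gA a i) i (a.length : Int)) 0 (a.length : Int) := by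
  have hin : ∀ i s : Int,
      (PySem.List.pyRange i (a.length : Int) 1).foldl
        (fun s j => kLoop a i j (PySem.List.pyRange 0 4 1) s) s
        = s + S (gA a i) i (a.length : Int) := by
    intro i s
    have hf : (fun (s : Int) j => kLoop a i j (PySem.List.pyRange 0 4 1) s)
        = fun s j => s + gA a i j := funext fun s => funext fun j => kLoop_eq a i j s
    rw [hf, PySem.List.foldl_add]
    rfl
  simp only [answer]
  simp only [hin]
  rw [PySem.List.foldl_add]
  simp only [zero_add]
  rfl

-- invariant of Source B's first loop
lemma bStep_invariant (a : List (List Int)) (d : Nat) :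
    ((PySem.List.pyRange 5 (5 + (d : Int)) 1).foldl (bStep a) (PySem.Dict.empty, 0, 0, 0, 0)).2
      = (S (fun q => colGet a q 0) 5 (5 + (d : Int)), S (fun q => colGet a q 1) 5 (5 + (d : Int)),
         S (fun q => colGet a q 2) 5 (5 + (d : Int)), S (fun q => colGet a q 3) 5 (5 + (d : Int)))
    ∧ ∀ j : Int, 5 ≤ j → j < 5 + (d : Int) →
      ((PySem.List.pyRange 5 (5 + (d : Int)) 1).foldl (bStep a) (PySem.Dict.empty, 0, 0, 0, 0)).1.getD j (0, 0, 0, 0)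
        = (S (fun q => colGet a q 0) 5 j, S (fun q => colGet a q 1) 5 j,
           S (fun q => colGet a q 2) 5 j, S (fun q => colGet a q 3) 5 j) := by
  induction d with
  | zero =>
    constructor
    · rw [show (5 : Int) + ((0 : Nat) : Int) = 5 by norm_num,
        PySem.List.pyRange_one_eq_nil (le_refl (5 : Int))]
      rw [S_nil _ (le_refl (5 : Int)), S_nil _ (le_refl (5 : Int)),
        S_nil _ (le_refl (5 : Int)), S_nil _ (le_refl (5 : Int))]
      rfl
    · intro j h1 h2
      exfalso
      have : ((0 : Nat) : Int) = 0 := by norm_num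
      omega
  | succ d ih =>
    obtain ⟨ih1, ih2⟩ := ih
    have hc : (5 : Int) + ((d + 1 : Nat) : Int) = (5 + (d : Int)) + 1 := by push_cast; ring
    have hd0 : (0 : Int) ≤ (d : Int) := Int.natCast_nonneg d
    rw [hc, PySem.List.pyRange_one_succ_right (by omega), List.foldl_append]
    rcases hprev : (PySem.List.pyRange 5 (5 + (d : Int)) 1).foldl (bStep a)
        (PySem.Dict.empty, 0, 0, 0, 0) with ⟨pre, t0, t1, t2, t3⟩
    rw [hprev] at ih1 ih2
    simp only [Prod.mk.injEq] at ih1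
    obtain ⟨e0, e1, e2, e3⟩ := ih1
    have hS : ∀ f : Int → Int, S f 5 (5 + (d : Int) + 1) = S f 5 (5 + (d : Int)) + f (5 + (d : Int)) := by
      intro f
      rw [S_split f (mid := 5 + (d : Int)) (by omega) (by omega), S_single]
    simp only [List.foldl_cons, List.foldl_nil, bStep]
    constructor
    · simp only [hS, colGet]
      rw [e0, e1, e2, e3]
      simp only [colGet]
    · intro j hj1 hj2
      by_cases hjd : j = 5 + (d : Int)
      · subst hjd
        rw [PySem.Dict.getD_insert_self]
        rw [e0, e1, e2, e3]
      · rw [PySem.Dict.getD_insert_of_ne _ _ _ hjd]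
        exact ih2 j hj1 (by omega)

-- per-index value of Source B's second loop body
lemma bBody_eq (a : List (List Int)) (d : Nat)
    (hn : (a.length : Int) = 5 + (d : Int)) (i total : Int) :
    bBody a (a.length : Int)
      ((PySem.List.pyRange 5 (5 + (d : Int)) 1).foldl (bStep a) (PySem.Dict.empty, 0, 0, 0, 0)).1
      (S (fun q => colGet a q 0) 5 (5 + (d : Int))) (S (fun q => colGet a q 1) 5 (5 + (d : Int)))
      (S (fun q => colGet a q 2) 5 (5 + (d : Int))) (S (fun q => colGet a q 3) 5 (5 + (d : Int)))
      total i
      = total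
        + ((if max (i + 1) (8 - i) < (a.length : Int)
            then S (crossT a i) (max (i + 1) (8 - i)) (a.length : Int) else 0)
          + (if 4 ≤ i then diagT a i else 0)) := by
  obtain ⟨_, ih2⟩ := bStep_invariant a d
  simp only [bBody, hn]
  by_cases hln : max (i + 1) (8 - i) < 5 + (d : Int)
  · rw [if_pos hln, if_pos hln]
    have hlo5 : (5 : Int) ≤ max (i + 1) (8 - i) := by omega
    rw [ih2 (max (i + 1) (8 - i)) hlo5 hln]
    have hsplit : ∀ f : Int → Int,
        S f 5 (5 + (d : Int)) = S f 5 (max (i + 1) (8 - i)) + S f (max (i + 1) (8 - i)) (5 + (d : Int)) :=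
      fun f => S_split f hlo5 (le_of_lt hln)
    rw [hsplit (fun q => colGet a q 0), hsplit (fun q => colGet a q 1),
      hsplit (fun q => colGet a q 2), hsplit (fun q => colGet a q 3), S_crossT]
    by_cases h4 : 4 ≤ i
    · rw [if_pos h4, if_pos h4]
      simp only [colGet, diagT]
      ring
    · rw [if_neg h4, if_neg h4]
      simp only [colGet]
      ring
  · rw [if_neg hln, if_neg hln]
    by_cases h4 : 4 ≤ i
    · rw [if_pos h4, if_pos h4]
      simp only [colGet, diagT]
      ring
    · rw [if_neg h4, if_neg h4]
      ring

-- B as a single sum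
lemma alt_eq_sum (a : List (List Int)) :
    answer_alt a
      = S (fun i =>
          (if max (i + 1) (8 - i) < (a.length : Int)
            then S (crossT a i) (max (i + 1) (8 - i)) (a.length : Int) else 0)
          + (if 4 ≤ i then diagT a i else 0))
          (max 0 (9 - (a.length : Int))) (a.length : Int) := by
  have hnn : (0 : Int) ≤ (a.length : Int) := Int.natCast_nonneg _
  by_cases h5 : (a.length : Int) < 5
  · simp only [answer_alt]
    rw [PySem.List.pyRange_one_eq_nil (show (a.length : Int) ≤ 5 by omega)]
    rw [PySem.List.pyRange_one_eq_nil (show (a.length : Int) ≤ max 0 (9 - (a.length : Int)) by omega)]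
    rw [S_nil _ (show (a.length : Int) ≤ max 0 (9 - (a.length : Int)) by omega)]
    rfl
  · push_neg at h5
    obtain ⟨d, hd⟩ : ∃ d : Nat, (a.length : Int) = 5 + (d : Int) := ⟨a.length - 5, by omega⟩
    obtain ⟨ih1, _⟩ := bStep_invariant a d
    simp only [answer_alt, hd]
    simp only [ih1]
    have hb : ∀ (total i : Int), i ∈ PySem.List.pyRange (max 0 (9 - (5 + (d : Int)))) (5 + (d : Int)) 1 →
        bBody a (5 + (d : Int))
          ((PySem.List.pyRange 5 (5 + (d : Int)) 1).foldl (bStep a) (PySem.Dict.empty, 0, 0, 0, 0)).1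
          (S (fun q => colGet a q 0) 5 (5 + (d : Int))) (S (fun q => colGet a q 1) 5 (5 + (d : Int)))
          (S (fun q => colGet a q 2) 5 (5 + (d : Int))) (S (fun q => colGet a q 3) 5 (5 + (d : Int)))
          total i
          = total
            + ((if max (i + 1) (8 - i) < 5 + (d : Int)
                then S (crossT a i) (max (i + 1) (8 - i)) (5 + (d : Int)) else 0)
              + (if 4 ≤ i then diagT a i else 0)) := by
      intro total i _
      have h := bBody_eq a d hd i total
      rw [hd] at h
      exact h
    rw [PySem.List.foldl_congr_mem _ _
      (fun total i => total
        + ((if max (i + 1) (8 - i) < 5 + (d : Int)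
            then S (crossT a i) (max (i + 1) (8 - i)) (5 + (d : Int)) else 0)
          + (if 4 ≤ i then diagT a i else 0))) _ hb,
      PySem.List.foldl_add]
    simp only [zero_add]
    rfl

-- per-index agreement of the two sums
lemma inner_eq (a : List (List Int)) (i : Int)
    (_hi0 : max 0 (9 - (a.length : Int)) ≤ i) (hi1 : i < (a.length : Int)) :
    S (gA a i) i (a.length : Int)
      = (if max (i + 1) (8 - i) < (a.length : Int)
          then S (crossT a i) (max (i + 1) (8 - i)) (a.length : Int) else 0)
        + (if 4 ≤ i then diagT a i else 0) := by
  have hsplit : S (gA a i) i (a.length : Int)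
      = gA a i i + S (gA a i) (i + 1) (a.length : Int) := by
    rw [S_split (gA a i) (show i ≤ i + 1 by omega) (by omega), S_single]
  rw [hsplit]
  have hdiag : gA a i i = if 4 ≤ i then diagT a i else 0 := by
    simp only [gA, if_true]
    by_cases h4 : 4 ≤ i
    · rw [if_pos (show (8 : Int) ≤ i + i by omega), if_pos h4]
    · rw [if_neg (show ¬ (8 : Int) ≤ i + i by omega), if_neg h4]
  rw [hdiag]
  by_cases hln : max (i + 1) (8 - i) < (a.length : Int)
  · rw [if_pos hln]
    rw [S_split (gA a i) (show i + 1 ≤ max (i + 1) (8 - i) by omega) (le_of_lt hln)]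
    rw [S_zero (gA a i) (fun x hx1 hx2 => by
      simp only [gA]
      rw [if_neg (show ¬ (8 : Int) ≤ i + x by omega)])]
    rw [S_congr (gA a i) (crossT a i) (fun x hx1 hx2 => by
      simp only [gA]
      rw [if_pos (show (8 : Int) ≤ i + x by omega),
        if_neg (show ¬ i = x by omega)])]
    ring
  · rw [if_neg hln]
    rw [S_zero (gA a i) (fun x hx1 hx2 => by
      simp only [gA]
      rw [if_neg (show ¬ (8 : Int) ≤ i + x by omega)])]
    ring

-- ===== VERDICT (by name: the statement is the Claim_ definition above) =====
theorem answer_spec : Claim_equal_answer := by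
  intro a _ _
  unfold Spec_answer
  rw [answer_eq_sum, alt_eq_sum]
  have hnn : (0 : Int) ≤ (a.length : Int) := Int.natCast_nonneg _
  by_cases h5 : (a.length : Int) < 5
  · rw [S_nil _ (show (a.length : Int) ≤ max 0 (9 - (a.length : Int)) by omega)]
    apply S_zero
    intro i hi1 hi2
    apply S_zero
    intro j hj1 hj2
    simp only [gA]
    rw [if_neg (show ¬ (8 : Int) ≤ i + j by omega)]
  · push_neg at h5
    have hm : (0 : Int) ≤ max 0 (9 - (a.length : Int)) := by omega
    have hm2 : max 0 (9 - (a.length : Int)) ≤ (a.length : Int) := by omega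
    rw [S_split _ hm hm2]
    rw [S_zero _ (fun i hi1 hi2 => S_zero (gA a i) (fun j hj1 hj2 => by
      simp only [gA]
      rw [if_neg (show ¬ (8 : Int) ≤ i + j by omega)]))]
    rw [zero_add]
    exact S_congr _ _ (fun i hi1 hi2 => inner_eq a i hi1 hi2)
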